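-- pv_equiv track=rewrite | github.com/aghilas-smail/Aghilas_org | 5. PYTHON TRAIN/leetcode/Bag_capacite.py | Solution
-- ===== SOURCE A (Python) =====
-- def Solution(capacity: list[int], rocks : list[int], additionalRocks : int) -> int:
--     needed_rocks  = []
--     for i in range(len(capacity)):
--         t = capacity[i] - rocks[i]
--         needed_rocks.append(t)
--
--     needed_rocks.sort()
--
--     full_bags = 0
--
--     for rocket_needed in needed_rocks :
--         if additionalRocks >= rocket_needed:
--             additionalRocks -= rocket_needed
--             full_bags += 1
--         else:
--             break
--
--     return full_bags
-- ===== SOURCE B (Python) =====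
-- def Solution(capacity: list[int], rocks: list[int], additionalRocks: int) -> int:
--     deficits = [c - r for c, r in zip(capacity, rocks)]
--     full_bags = 0
--     while deficits:
--         m = min(deficits)
--         if additionalRocks < m:
--             break
--         additionalRocks -= m
--         deficits.remove(m)
--         full_bags += 1
--     return full_bags
-- ===== Notes on version B (the rewrite author's own statement) =====
-- stated objective: alternative
-- what changed: Replaces A's sort-then-scan (sort all deficits, then a break-on-failure prefix loop) by a selection-based greedy that never sorts: repeatedly extract the minimum remaining deficit with min/remove until the budget cannot pay it.
import Mathlib
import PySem

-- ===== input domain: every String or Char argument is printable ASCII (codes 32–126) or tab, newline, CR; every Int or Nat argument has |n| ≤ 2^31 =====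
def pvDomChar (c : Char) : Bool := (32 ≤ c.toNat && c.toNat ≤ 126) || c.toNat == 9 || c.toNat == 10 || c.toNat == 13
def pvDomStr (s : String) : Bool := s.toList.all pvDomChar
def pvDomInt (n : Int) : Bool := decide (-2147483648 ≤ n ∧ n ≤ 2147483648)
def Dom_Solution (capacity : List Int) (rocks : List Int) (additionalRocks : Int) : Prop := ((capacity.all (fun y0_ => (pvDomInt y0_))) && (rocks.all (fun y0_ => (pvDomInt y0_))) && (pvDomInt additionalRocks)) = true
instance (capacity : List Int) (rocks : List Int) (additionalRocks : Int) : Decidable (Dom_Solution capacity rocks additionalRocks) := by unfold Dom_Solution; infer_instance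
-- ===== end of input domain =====

-- B replaces A's sort-then-scan by a selection-based greedy (min + remove each round, no sort); alternative algorithm, similar purpose, quadratic instead of sorting.
-- A raises IndexError when rocks is shorter than capacity; Pre_ excludes exactly those inputs.


-- ===== PORT A =====
-- the second loop of A: greedy subtract with break over the sorted deficits
def SolutionLoop (additionalRocks : Int) (fullBags : Int) : List Int → Int
  | [] => fullBags
  | d :: ds => if additionalRocks ≥ d then SolutionLoop (additionalRocks - d) (fullBags + 1) ds else fullBags

def Solution (capacity : List Int) (rocks : List Int) (additionalRocks : Int) : Int :=
  let needed_rocks := (PySem.List.pyRange 0 capacity.length 1).foldl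
      (fun acc i => acc ++ [PySem.List.pyGetD capacity i 0 - PySem.List.pyGetD rocks i 0]) []
  let sortedNeeded := PySem.List.sorted needed_rocks (fun x => x) false
  SolutionLoop additionalRocks 0 sortedNeeded

-- ===== PORT B =====
-- Source B's while loop: take the minimum remaining deficit, stop when the budget cannot pay it.
-- deficits.remove(m) removes the first occurrence of m; since m = min(deficits) ∈ deficits this
-- is exactly List.erase (PySem.List.remove?_eq_some_erase), so the port uses .erase.
def SelLoop (additionalRocks : Int) (fullBags : Int) (ds : List Int) : Int :=
  match hm : PySem.List.min? ds (fun x => x) with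
  | none => fullBags
  | some m =>
    if additionalRocks < m then fullBags
    else SelLoop (additionalRocks - m) (fullBags + 1) (ds.erase m)
termination_by ds.length
decreasing_by
  have hmem : m ∈ ds := PySem.List.min?_mem hm
  have h1 := List.length_erase_of_mem hmem
  have h2 := List.length_pos_of_mem hmem
  omega

def Solution_alt (capacity : List Int) (rocks : List Int) (additionalRocks : Int) : Int :=
  let deficits := (capacity.zip rocks).map (fun p => p.1 - p.2)
  SelLoop additionalRocks 0 deficits

-- ===== PRECONDITION & SPEC =====
-- A raises IndexError on rocks[i] when rocks is shorter than capacity; those inputs are excluded.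
def Pre_Solution (capacity : List Int) (rocks : List Int) (additionalRocks : Int) : Prop :=
  capacity.length ≤ rocks.length
instance (capacity : List Int) (rocks : List Int) (additionalRocks : Int) : Decidable (Pre_Solution capacity rocks additionalRocks) := by unfold Pre_Solution; infer_instance
def pvWitness_Solution : List Int × List Int × Int := ([4, 2, 3], [1, 2, 0], 4)

def Spec_Solution (capacity : List Int) (rocks : List Int) (additionalRocks : Int) (out : Int) : Prop := out = Solution_alt capacity rocks additionalRocks
instance (capacity : List Int) (rocks : List Int) (additionalRocks : Int) (out : Int) : Decidable (Spec_Solution capacity rocks additionalRocks out) := by unfold Spec_Solution; infer_instance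

-- ===== CLAIM (what is proved, stated in full; the proofs are below) =====
def Claim_equal_Solution : Prop := ∀ (capacity : List Int) (rocks : List Int) (additionalRocks : Int), Dom_Solution capacity rocks additionalRocks → Pre_Solution capacity rocks additionalRocks → Spec_Solution capacity rocks additionalRocks (Solution capacity rocks additionalRocks)

-- ===== LEMMAS AND PROOFS =====

-- the deficit list A builds equals B's zip-based deficit list when rocks is long enough
theorem needed_eq_zip (capacity rocks : List Int) (hlen : capacity.length ≤ rocks.length) :
    (PySem.List.pyRange 0 capacity.length 1).foldl
      (fun acc i => acc ++ [PySem.List.pyGetD capacity i 0 - PySem.List.pyGetD rocks i 0]) []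
    = (capacity.zip rocks).map (fun p => p.1 - p.2) := by
  rw [PySem.List.foldl_append_singleton_eq_map]
  apply List.ext_getElem
  · simp [PySem.List.length_pyRange_one, Nat.min_eq_left hlen]
  · intro k h1 h2
    have hk : k < capacity.length := by
      simpa [PySem.List.length_pyRange_one] using h1
    have hk2 : k < rocks.length := lt_of_lt_of_le hk hlen
    simp [PySem.List.getElem_pyRange_one, PySem.List.pyGetD_natCast,
      List.getD_eq_getElem?_getD, hk, hk2]

-- the sorted list decomposes as its minimum followed by the sorted remainder
theorem sorted_eq_min_cons (l : List Int) (m : Int)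
    (hm : PySem.List.min? l (fun x => x) = some m) :
    PySem.List.sorted l (fun x => x) false = m :: PySem.List.sorted (l.erase m) (fun x => x) false := by
  have hmem : m ∈ l := PySem.List.min?_mem hm
  apply PySem.List.sorted_id_eq_of_perm_of_pairwise
  · exact ((PySem.List.sorted_perm (l.erase m) (fun x => x) false).cons m).trans
      (List.perm_cons_erase hmem).symm
  · constructor
    · intro y hy
      have : y ∈ l.erase m := (PySem.List.mem_sorted _ _ _ _).mp hy
      exact PySem.List.min?_isMin hm y (List.mem_of_mem_erase this)
    · exact PySem.List.sorted_pairwise (l.erase m) (fun x => x)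

-- A's break loop over the sorted deficits equals B's selection loop over the raw deficits
theorem solutionLoop_eq_selLoop (n : Nat) : ∀ (l : List Int), l.length ≤ n → ∀ (ar b : Int),
    SolutionLoop ar b (PySem.List.sorted l (fun x => x) false) = SelLoop ar b l := by
  induction n with
  | zero =>
    intro l hl ar b
    have : l = [] := List.length_eq_zero_iff.mp (Nat.le_zero.mp hl)
    subst this
    rw [SelLoop]
    simp [PySem.List.sorted, SolutionLoop, PySem.List.min?]
  | succ n ih =>
    intro l hl ar b
    rcases hm : PySem.List.min? l (fun x => x) with _ | m
    · have : l = [] := (PySem.List.min?_eq_none_iff _ _).mp hm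
      subst this
      rw [SelLoop]
      simp [PySem.List.sorted, SolutionLoop, PySem.List.min?]
    · have hmem : m ∈ l := PySem.List.min?_mem hm
      rw [sorted_eq_min_cons l m hm, SelLoop.eq_def]
      split
      · rename_i heq
        rw [hm] at heq
        cases heq
      · rename_i m' heq
        rw [hm] at heq
        injection heq with e
        subst e
        rw [SolutionLoop]
        by_cases h : ar < m
        · rw [if_pos h, if_neg (not_le.mpr h)]
        · rw [if_neg h, if_pos (not_lt.mp h)]
          apply ih
          have := List.length_erase_of_mem hmem
          have hpos : 0 < l.length := List.length_pos_of_mem hmem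
          omega

theorem Solution_eq (capacity rocks : List Int) (additionalRocks : Int)
    (hlen : capacity.length ≤ rocks.length) :
    Solution capacity rocks additionalRocks = Solution_alt capacity rocks additionalRocks := by
  unfold Solution Solution_alt
  rw [needed_eq_zip capacity rocks hlen]
  exact solutionLoop_eq_selLoop _ _ le_rfl additionalRocks 0

-- ===== VERDICT (by name: the statement is the Claim_ definition above) =====
theorem Solution_spec : Claim_equal_Solution := by
  intro capacity rocks additionalRocks _ hpre
  exact Solution_eq capacity rocks additionalRocks hpre
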